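-- pv_equiv track=rewrite | github.com/0m3re/konzepteDerProgrammierung | 02ueb/mastermind.py | compare_prev
-- ===== SOURCE A (Python) =====
-- def base_prev(base_str):
--     histo = {}
--     for char in base_str:
--         x = histo.get(char)
--         if x == None:
--             histo.update({char: 1})
--         else:
--             histo.update({char: x+1})
--     return histo
--
-- def compare_prev(base_str_a, base_str_b):
--     first_prev = base_prev(base_str_a)
--     second_prev = base_prev(base_str_b)
--     prev = 0
--     for key, prevalence in first_prev.items():
--         if second_prev.get(key) == prevalence:
--             prev+=1
--     return prev
-- ===== SOURCE B (Python) =====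
-- def compare_prev(base_str_a, base_str_b):
--     # Sort both strings, then merge the two sorted char sequences run by run:
--     # a run of the same char in each; count 1 when both runs have equal length.
--     def merge(xs, ys):
--         if not xs:
--             return 0
--         c = xs[0]
--         i = 1
--         while i < len(xs) and xs[i] == c:
--             i += 1
--         j = 0
--         while j < len(ys) and ys[j] < c:
--             j += 1
--         k = j
--         while k < len(ys) and ys[k] == c:
--             k += 1
--         return (1 if i == k - j else 0) + merge(xs[i:], ys[k:])
--     return merge(sorted(base_str_a), sorted(base_str_b))
-- ===== Notes on version B (the rewrite author's own statement) =====
-- stated objective: alternative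
-- what changed: Replaces A's two hash histograms and dict-lookup comparison loop by sorting both strings and merging the two sorted character sequences run by run, counting runs of the same char with equal length.
import Mathlib
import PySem

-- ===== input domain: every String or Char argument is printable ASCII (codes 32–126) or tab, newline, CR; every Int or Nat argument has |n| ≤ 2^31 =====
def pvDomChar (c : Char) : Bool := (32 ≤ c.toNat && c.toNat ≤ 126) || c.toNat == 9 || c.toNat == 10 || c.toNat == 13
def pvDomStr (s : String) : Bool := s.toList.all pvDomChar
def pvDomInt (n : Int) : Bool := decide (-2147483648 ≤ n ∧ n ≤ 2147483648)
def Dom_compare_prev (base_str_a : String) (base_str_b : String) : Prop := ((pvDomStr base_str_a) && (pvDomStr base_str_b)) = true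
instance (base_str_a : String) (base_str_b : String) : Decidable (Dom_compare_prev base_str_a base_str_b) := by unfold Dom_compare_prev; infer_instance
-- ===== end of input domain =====

-- B drops A's hash histograms entirely: it sorts both strings and merges the two
-- sorted sequences run by run, counting runs of the same char with equal length
-- (alternative algorithm; sort-based instead of dictionary-based).

-- ===== PORT A =====
-- base_prev: build a histogram dict char -> count, exactly as A does (get, then insert 1 or x+1)
def pvBasePrev (s : List Char) : PySem.Dict Char Int :=
  s.foldl (fun histo c =>
    match histo.get? c with
    | none => histo.insert c 1
    | some x => histo.insert c (x + 1)) PySem.Dict.empty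

def compare_prev (base_str_a : String) (base_str_b : String) : Int :=
  let first_prev := pvBasePrev base_str_a.toList
  let second_prev := pvBasePrev base_str_b.toList
  first_prev.items.foldl
    (fun prev kv => if second_prev.get? kv.1 == some kv.2 then prev + 1 else prev) 0

-- ===== PORT B =====
-- merge(xs, ys) of Source B: xs, ys sorted; take the run of xs's first char in each
-- list (skipping ys's smaller chars), score 1 iff the two runs have equal length,
-- recurse on the remainders.
def pvMerge : List Char → List Char → Int
  | [], _ => 0
  | c :: xs, ys =>
    let ta := xs.takeWhile (fun x => x == c)          -- rest of c's run in xs (i = ta.length + 1)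
    let ys1 := ys.dropWhile (fun y => decide (y < c)) -- skip ys chars below c (the j loop)
    let tb := ys1.takeWhile (fun y => y == c)         -- c's run in ys (k - j = tb.length)
    (if ta.length + 1 = tb.length then (1 : Int) else 0)
      + pvMerge (xs.dropWhile (fun x => x == c)) (ys1.dropWhile (fun y => y == c))
termination_by xs _ => xs.length
decreasing_by
  simp only [List.length_cons]
  exact Nat.lt_succ_of_le (List.length_dropWhile_le _ _)

def compare_prev_alt (base_str_a : String) (base_str_b : String) : Int :=
  pvMerge (PySem.List.sorted base_str_a.toList (fun x => x) false)
          (PySem.List.sorted base_str_b.toList (fun x => x) false)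

-- ===== PRECONDITION & SPEC =====
def Spec_compare_prev (base_str_a : String) (base_str_b : String) (out : Int) : Prop := out = compare_prev_alt base_str_a base_str_b
instance (base_str_a : String) (base_str_b : String) (out : Int) : Decidable (Spec_compare_prev base_str_a base_str_b out) := by unfold Spec_compare_prev; infer_instance

-- ===== CLAIM (what is proved, stated in full; the proofs are below) =====
def Claim_equal_compare_prev : Prop := ∀ (base_str_a : String) (base_str_b : String), Dom_compare_prev base_str_a base_str_b → Spec_compare_prev base_str_a base_str_b (compare_prev base_str_a base_str_b)

-- ===== LEMMAS AND PROOFS =====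

-- A's histogram loop is Counter(s)
theorem pvBasePrev_eq_counter (s : List Char) : pvBasePrev s = PySem.Dict.counter s := by
  unfold pvBasePrev
  rw [← PySem.Dict.foldl_insert_getD_add_one_eq_counter]
  congr 1
  funext d c
  cases h : d.get? c with
  | none => rw [PySem.Dict.getD_eq_get?_getD, h]; rfl
  | some x => rw [PySem.Dict.getD_eq_get?_getD, h]; rfl

-- the per-key tests agree on every distinct char of a
theorem pv_test_eq (la lb : List Char) (k : Char) (hk : k ∈ la) :
    ((PySem.Dict.counter lb).get? k == some ((la.count k : Int)))
      = (la.count k == lb.count k) := by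
  by_cases hb : k ∈ lb
  · have : (PySem.Dict.counter lb).get? k = some ((lb.count k : Int)) := by
      rw [PySem.Dict.get?_eq_some_iff_mem_items _ _ _ (PySem.Dict.nodup_keys_counter lb)]
      rw [PySem.Dict.items_counter]
      exact List.mem_map.mpr ⟨k, (PySem.Set.mem_ofList _ _).mpr hb, rfl⟩
    simp [this, Nat.cast_inj, eq_comm]
  · have hc : (PySem.Dict.counter lb).contains k = false := by
      have := PySem.Dict.contains_counter (xs := lb) (v := k)
      simp_all [PySem.Dict.contains_counter]
    have hn : (PySem.Dict.counter lb).get? k = none := by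
      rw [← PySem.Dict.get?_eq_none_iff_contains] at hc
      exact hc
    have ha : 0 < la.count k := List.count_pos_iff.mpr hk
    have hbz : lb.count k = 0 := List.count_eq_zero.mpr hb
    simp [hn, hbz]
    omega

-- in a sorted list, every member of dropWhile p sits above some element failing p
theorem pv_dropWhile_mem_bound (p : Char → Bool) (l : List Char)
    (hp : l.Pairwise (fun a b => a ≤ b)) :
    ∀ x ∈ l.dropWhile p, ∃ h0 ∈ l, p h0 = false ∧ h0 ≤ x := by
  cases hd : l.dropWhile p with
  | nil => intro x hx; simp at hx
  | cons h0 tl =>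
    intro x hx
    have hsub : (h0 :: tl).Sublist l := hd ▸ List.dropWhile_sublist p
    have h0mem : h0 ∈ l := hsub.subset (List.mem_cons_self)
    have hpf : p h0 = false := by
      have hlen : 0 < (l.dropWhile p).length := by rw [hd]; simp
      have := List.dropWhile_get_zero_not p l hlen
      simpa [hd] using this
    have hpw : (h0 :: tl).Pairwise (fun a b => a ≤ b) := hp.sublist hsub
    rcases List.mem_cons.mp hx with heq | hxtl
    · exact ⟨h0, h0mem, hpf, le_of_eq heq.symm⟩
    · exact ⟨h0, h0mem, hpf, (List.pairwise_cons.mp hpw).1 x hxtl⟩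

-- core lemma: on sorted inputs, pvMerge counts the distinct chars of xs (listed by
-- any duplicate-free enumeration l) whose multiplicity in xs equals that in ys
theorem pvMerge_eq (n : Nat) : ∀ (xs ys l : List Char), xs.length ≤ n →
    xs.Pairwise (fun a b => a ≤ b) → ys.Pairwise (fun a b => a ≤ b) →
    l.Nodup → (∀ d, d ∈ l ↔ d ∈ xs) →
    pvMerge xs ys = ((l.countP (fun d => xs.count d == ys.count d) : Nat) : Int) := by
  induction n with
  | zero =>
    intro xs ys l hlen _ _ _ hm
    have hx : xs = [] := List.eq_nil_of_length_eq_zero (Nat.le_zero.mp hlen)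
    subst hx
    have hl : l = [] := List.eq_nil_iff_forall_not_mem.mpr (fun d hd => by simpa using (hm d).mp hd)
    subst hl
    simp [pvMerge]
  | succ n ih =>
    intro xs ys l hlen hxs hys hnd hm
    cases xs with
    | nil =>
      have hl : l = [] := List.eq_nil_iff_forall_not_mem.mpr (fun d hd => by simpa using (hm d).mp hd)
      subst hl
      simp [pvMerge]
    | cons c t =>
      -- names for the pieces
      set ta := t.takeWhile (fun x => x == c) with hta_def
      set ra := t.dropWhile (fun x => x == c) with hra_def
      set ys1 := ys.dropWhile (fun y => decide (y < c)) with hys1_def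
      set tb := ys1.takeWhile (fun y => y == c) with htb_def
      set rb := ys1.dropWhile (fun y => y == c) with hrb_def
      have ht_pw : t.Pairwise (fun a b => a ≤ b) := (List.pairwise_cons.mp hxs).2
      have hc_le : ∀ x ∈ t, c ≤ x := (List.pairwise_cons.mp hxs).1
      -- all elements of ta (and tb) are c
      have hta_all : ∀ x ∈ ta, x = c := fun x hx => by
        simpa using List.mem_takeWhile_imp hx
      -- elements of ra are > c
      have hra_gt : ∀ x ∈ ra, c < x := by
        intro x hx
        obtain ⟨h0, h0t, hpf, h0le⟩ := pv_dropWhile_mem_bound _ t ht_pw x hx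
        have : h0 ≠ c := by simpa using hpf
        exact lt_of_lt_of_le (lt_of_le_of_ne (hc_le h0 h0t) (Ne.symm this)) h0le
      have hra_sub : ra.Sublist t := List.dropWhile_sublist _
      have hra_pw : ra.Pairwise (fun a b => a ≤ b) := ht_pw.sublist hra_sub
      -- elements of ys1 are ≥ c
      have hys1_ge : ∀ x ∈ ys1, c ≤ x := by
        intro x hx
        obtain ⟨h0, _, hpf, h0le⟩ := pv_dropWhile_mem_bound _ ys hys x hx
        have : ¬ h0 < c := by simpa using hpf
        exact le_trans (le_of_not_gt this) h0le
      have hys1_pw : ys1.Pairwise (fun a b => a ≤ b) := hys.sublist (List.dropWhile_sublist _)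
      have htb_all : ∀ x ∈ tb, x = c := fun x hx => by
        simpa using List.mem_takeWhile_imp hx
      have hrb_gt : ∀ x ∈ rb, c < x := by
        intro x hx
        obtain ⟨h0, h0y, hpf, h0le⟩ := pv_dropWhile_mem_bound _ ys1 hys1_pw x hx
        have hne : h0 ≠ c := by simpa using hpf
        exact lt_of_lt_of_le (lt_of_le_of_ne (hys1_ge h0 h0y) (Ne.symm hne)) h0le
      have hrb_pw : rb.Pairwise (fun a b => a ≤ b) := hys1_pw.sublist (List.dropWhile_sublist _)
      -- decompositions
      have ht_split : ta ++ ra = t := List.takeWhile_append_dropWhile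
      have hys_split : ys.takeWhile (fun y => decide (y < c)) ++ ys1 = ys :=
        List.takeWhile_append_dropWhile
      have hys1_split : tb ++ rb = ys1 := List.takeWhile_append_dropWhile
      -- count of c
      have hcount_ta : ta.count c = ta.length :=
        List.count_eq_length.mpr (fun b hb => (hta_all b hb).symm)
      have hcount_ra0 : ra.count c = 0 :=
        List.count_eq_zero.mpr (fun h => lt_irrefl c (hra_gt c h))
      have hcount_xs_c : (c :: t).count c = ta.length + 1 := by
        rw [List.count_cons_self, ← ht_split, List.count_append, hcount_ta, hcount_ra0]
      have hcount_tb : tb.count c = tb.length :=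
        List.count_eq_length.mpr (fun b hb => (htb_all b hb).symm)
      have hcount_rb0 : rb.count c = 0 :=
        List.count_eq_zero.mpr (fun h => lt_irrefl c (hrb_gt c h))
      have hdrop_lt : ∀ x ∈ ys.takeWhile (fun y => decide (y < c)), x < c := fun x hx => by
        simpa using List.mem_takeWhile_imp hx
      have hcount_drop0 : (ys.takeWhile (fun y => decide (y < c))).count c = 0 :=
        List.count_eq_zero.mpr (fun h => lt_irrefl c (hdrop_lt c h))
      have hcount_ys_c : ys.count c = tb.length := by
        rw [← hys_split, List.count_append, hcount_drop0, ← hys1_split, List.count_append,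
          hcount_tb, hcount_rb0]
        omega
      -- counts of d ≠ c with c < d
      have hcount_xs_d : ∀ d, c < d → (c :: t).count d = ra.count d := by
        intro d hd
        have hne : d ≠ c := ne_of_gt hd
        have h1 : ta.count d = 0 := List.count_eq_zero.mpr (fun h => hne (hta_all d h))
        calc (c :: t).count d = t.count d := by
              simp only [List.count_cons]
              have : ¬ c = d := fun h => hne h.symm
              simp [this]
          _ = ta.count d + ra.count d := by rw [← ht_split, List.count_append]
          _ = ra.count d := by omega
      have hcount_ys_d : ∀ d, c < d → ys.count d = rb.count d := by
        intro d hd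
        have hne : d ≠ c := ne_of_gt hd
        rw [← hys_split, List.count_append, ← hys1_split, List.count_append]
        have h1 : (ys.takeWhile (fun y => decide (y < c))).count d = 0 :=
          List.count_eq_zero.mpr (fun h => lt_asymm hd (hdrop_lt d h))
        have h2 : tb.count d = 0 := List.count_eq_zero.mpr (fun h => hne (htb_all d h))
        omega
      -- split l as c :: (l.erase c) up to permutation
      have hcl : c ∈ l := (hm c).mpr (List.mem_cons_self)
      have hperm : l.Perm (c :: l.erase c) := List.perm_cons_erase hcl
      have hcountP : l.countP (fun d => (c :: t).count d == ys.count d)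
          = (l.erase c).countP (fun d => (c :: t).count d == ys.count d)
            + (if ((c :: t).count c == ys.count c) then 1 else 0) := by
        rw [hperm.countP_eq, List.countP_cons]
      -- membership of l.erase c is exactly ra
      have hmem_erase : ∀ d, d ∈ l.erase c ↔ d ∈ ra := by
        intro d
        rw [hnd.mem_erase_iff]
        constructor
        · rintro ⟨hne, hdl⟩
          rcases List.mem_cons.mp ((hm d).mp hdl) with rfl | hdt
          · exact absurd rfl hne
          · rcases List.mem_append.mp (ht_split ▸ hdt) with h | h
            · exact absurd (hta_all d h) hne
            · exact h
        · intro hdra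
          refine ⟨ne_of_gt (hra_gt d hdra), (hm d).mpr ?_⟩
          exact List.mem_cons_of_mem _ (hra_sub.subset hdra)
      -- the inner countP agrees with the recursive one
      have hcongr : (l.erase c).countP (fun d => (c :: t).count d == ys.count d)
          = (l.erase c).countP (fun d => ra.count d == rb.count d) := by
        apply List.countP_congr
        intro d hd
        have hdra : d ∈ ra := (hmem_erase d).mp hd
        have hcd : c < d := hra_gt d hdra
        rw [hcount_xs_d d hcd, hcount_ys_d d hcd]
      -- recursive call via ih
      have hlen' : ra.length ≤ n := by
        have h1 : ra.length ≤ t.length := List.length_dropWhile_le _ _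
        have h2 : t.length + 1 ≤ n + 1 := by simpa using hlen
        omega
      have hrec := ih ra rb (l.erase c) hlen' hra_pw hrb_pw (hnd.erase c) hmem_erase
      -- assemble
      simp only [pvMerge]
      rw [← hys1_def, ← hta_def, ← hra_def, ← htb_def, ← hrb_def]
      rw [hcountP, hcongr, hrec, hcount_xs_c, hcount_ys_c]
      by_cases hEq : ta.length + 1 = tb.length
      · have hb' : (ta.length + 1 == tb.length) = true := beq_iff_eq.mpr hEq
        rw [if_pos hEq, hb', if_pos rfl]
        push_cast
        ring
      · have hb' : (ta.length + 1 == tb.length) = false := by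
          simpa using hEq
        rw [if_neg hEq, hb']
        simp only [Bool.false_eq_true, if_false]
        push_cast
        ring

-- ===== VERDICT (by name: the statement is the Claim_ definition above) =====
theorem compare_prev_spec : Claim_equal_compare_prev := by
  intro a b _
  unfold Spec_compare_prev compare_prev compare_prev_alt
  -- A's side: histogram loop = Counter, comparison loop = a countP over distinct chars of a
  simp only [pvBasePrev_eq_counter]
  rw [PySem.Dict.items_counter]
  rw [PySem.List.foldl_if_add_one]
  rw [List.countP_map]
  have hA : List.countP
      ((fun kv => (PySem.Dict.counter b.toList).get? kv.1 == some kv.2) ∘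
        fun k => (k, (a.toList.count k : Int)))
      (PySem.Set.ofList a.toList)
    = List.countP (fun c => a.toList.count c == b.toList.count c)
      (PySem.Set.ofList a.toList) := by
    apply List.countP_congr
    intro k hk
    have ht := pv_test_eq a.toList b.toList k ((PySem.Set.mem_ofList _ _).mp hk)
    simp only [Function.comp_apply]
    rw [ht]
  rw [hA]
  -- B's side: pvMerge on the two sorted lists counts the same thing
  have hpa : (PySem.List.sorted a.toList (fun x => x) false).Pairwise (fun x y => x ≤ y) := by
    simpa using PySem.List.sorted_pairwise a.toList (fun x => x)
  have hpb : (PySem.List.sorted b.toList (fun x => x) false).Pairwise (fun x y => x ≤ y) := by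
    simpa using PySem.List.sorted_pairwise b.toList (fun x => x)
  have hmem : ∀ d, d ∈ PySem.Set.ofList a.toList ↔ d ∈ PySem.List.sorted a.toList (fun x => x) false := by
    intro d
    rw [PySem.Set.mem_ofList, PySem.List.mem_sorted]
  have hB := pvMerge_eq (PySem.List.sorted a.toList (fun x => x) false).length
    (PySem.List.sorted a.toList (fun x => x) false)
    (PySem.List.sorted b.toList (fun x => x) false)
    (PySem.Set.ofList a.toList) (le_refl _) hpa hpb (PySem.Set.nodup_ofList a.toList) hmem
  rw [hB, zero_add]
  congr 1
  apply List.countP_congr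
  intro d _
  rw [(PySem.List.sorted_perm a.toList (fun x => x) false).count_eq,
      (PySem.List.sorted_perm b.toList (fun x => x) false).count_eq]
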